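-- pv_equiv track=rewrite | github.com/mxuanli/leetcode_py | 765. 情侣牵手.py | minSwapsCouples2
-- ===== SOURCE A (Python) =====
-- def minSwapsCouples2(row: list) -> int:
--     r, n = 0, len(row)
--     for i in range(0, n, 2):
--         if row[i] // 2 == row[i + 1] // 2:
--             continue
--         for j in range(i + 1, n):
--             if row[i] // 2 == row[j] // 2:
--                 row[i + 1], row[j] = row[j], row[i + 1]
--                 r += 1
--     return r
-- ===== SOURCE B (Python) =====
-- def minSwapsCouples2(row: list) -> int:
--     swaps = 0
--     seg = list(row)
--     while seg:
--         a, b, seg = seg[0], seg[1], seg[2:]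
--         if a // 2 != b // 2:
--             for j in range(len(seg)):
--                 if seg[j] // 2 == a // 2:
--                     seg[j] = b
--                     swaps += 1
--                     break
--     return swaps
-- ===== Notes on version B (the rewrite author's own statement) =====
-- stated objective: alternative
-- what changed: A fixes each pair with index-based inner scans over the shared array and keeps scanning (and swapping) after the pair is fixed; B consumes the list pair by pair, placing the displaced seat-mate at the first partner position and stopping there; Pre_ excludes odd-length rows (A raises IndexError) and rows where some couple id x//2 occurs more than twice, which encode no valid couples seating, so the swap count there is an unspecified artefact of scan order.
-- outside the precondition, e.g. on minSwapsCouples2([0, 2, 1, 1]): A returns 2, B returns 1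
import Mathlib
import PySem

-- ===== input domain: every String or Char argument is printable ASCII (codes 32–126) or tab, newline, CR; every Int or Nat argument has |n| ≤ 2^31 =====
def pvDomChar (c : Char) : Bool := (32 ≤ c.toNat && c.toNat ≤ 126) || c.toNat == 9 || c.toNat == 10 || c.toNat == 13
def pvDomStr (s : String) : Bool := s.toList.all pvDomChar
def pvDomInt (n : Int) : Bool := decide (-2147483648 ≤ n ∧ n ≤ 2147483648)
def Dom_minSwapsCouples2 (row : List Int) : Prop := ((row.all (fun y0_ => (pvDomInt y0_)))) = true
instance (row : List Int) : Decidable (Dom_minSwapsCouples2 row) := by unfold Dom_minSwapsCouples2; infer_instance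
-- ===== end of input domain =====

-- B consumes the row pair by pair, placing the displaced seat-mate at the first partner position,
-- instead of A's index-based in-place double loop (objective: alternative; the equivalence is about
-- the return value only — A mutates its argument in place, B does not).

-- ===== PORT A =====
-- row[i] for a nonnegative index (all reads are in range on Pre_, so the default is never hit there)
def pvGi (row : List Int) (i : Nat) : Int := (PySem.List.pyGet? row (i : Int)).getD 0

-- inner loop 'for j in range(i + 1, n): …' over state (row, r)
def aInner (n i j : Nat) (row : List Int) (r : Int) : List Int × Int :=
  if h : j < n then
    if PySem.Int.floordiv (pvGi row i) 2 = PySem.Int.floordiv (pvGi row j) 2 then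
      aInner n i (j+1) ((row.set (i+1) (pvGi row j)).set j (pvGi row (i+1))) (r + 1)
    else
      aInner n i (j+1) row r
  else (row, r)
termination_by n - j
decreasing_by all_goals omega

-- outer loop 'for i in range(0, n, 2): …'
def aOuter (n i : Nat) (row : List Int) (r : Int) : Int :=
  if h : i < n then
    if PySem.Int.floordiv (pvGi row i) 2 = PySem.Int.floordiv (pvGi row (i+1)) 2 then
      aOuter n (i+2) row r
    else
      let p := aInner n i (i+1) row r
      aOuter n (i+2) p.1 p.2
  else r
termination_by n - i
decreasing_by all_goals omega

def minSwapsCouples2 (row : List Int) : Int := aOuter row.length 0 row 0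

-- ===== PORT B =====
-- the inner 'for j in range(len(seg)): … break' : replace the first element of group g by b
def bFix (g b : Int) : List Int → List Int × Int
  | [] => ([], 0)
  | x :: xs =>
    if PySem.Int.floordiv x 2 = g then (b :: xs, 1)
    else
      let p := bFix g b xs
      (x :: p.1, p.2)

-- needed by bLoop's termination proof
theorem bFix_len (g b : Int) (s : List Int) : (bFix g b s).1.length = s.length := by
  induction s with
  | nil => rfl
  | cons x xs ih => simp only [bFix]; split <;> simp [ih]

-- the 'while seg:' loop (an odd leftover element raises in Python; the match's default arm covers [])
def bLoop (seg : List Int) (swaps : Int) : Int :=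
  match seg with
  | a :: b :: rest =>
    if PySem.Int.floordiv a 2 ≠ PySem.Int.floordiv b 2 then
      let p := bFix (PySem.Int.floordiv a 2) b rest
      bLoop p.1 (swaps + p.2)
    else bLoop rest swaps
  | _ => swaps
termination_by seg.length
decreasing_by all_goals simp [bFix_len]

def minSwapsCouples2_alt (row : List Int) : Int := bLoop row 0

-- ===== PRECONDITION & SPEC =====
-- Pre_ excludes odd-length rows, on which A (and B) raise IndexError, and rows in which some couple
-- id x//2 occurs more than twice: those encode no valid couples seating, and the swap count returned
-- there is an unspecified artefact of scan order (A keeps scanning after a pair is fixed, B stops at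
-- the first partner).
def Pre_minSwapsCouples2 (row : List Int) : Prop :=
  row.length % 2 = 0 ∧
  ∀ x ∈ row, row.countP (fun y => PySem.Int.floordiv y 2 = PySem.Int.floordiv x 2) ≤ 2
instance (row : List Int) : Decidable (Pre_minSwapsCouples2 row) := by
  unfold Pre_minSwapsCouples2; infer_instance
def pvWitness_minSwapsCouples2 : List Int := [0, 2, 1, 3]

def Spec_minSwapsCouples2 (row : List Int) (out : Int) : Prop := out = minSwapsCouples2_alt row
instance (row : List Int) (out : Int) : Decidable (Spec_minSwapsCouples2 row out) := by
  unfold Spec_minSwapsCouples2; infer_instance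

-- ===== CLAIM (what is proved, stated in full; the proofs are below) =====
def Claim_equal_minSwapsCouples2 : Prop := ∀ (row : List Int), Dom_minSwapsCouples2 row → Pre_minSwapsCouples2 row → Spec_minSwapsCouples2 row (minSwapsCouples2 row)

-- ===== LEMMAS AND PROOFS =====

-- A's inner loop recast: the carry-passing sweep it performs on the tail (proof-side helper only)
def cPass (g carry : Int) : List Int → List Int × Int × Int
  | [] => ([], carry, 0)
  | x :: xs =>
    if PySem.Int.floordiv x 2 = g then
      let p := cPass g x xs
      (carry :: p.1, p.2.1, p.2.2 + 1)
    else
      let p := cPass g carry xs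
      (x :: p.1, p.2.1, p.2.2)

theorem cPass_len (g carry : Int) (s : List Int) : (cPass g carry s).1.length = s.length := by
  induction s generalizing carry with
  | nil => rfl
  | cons x xs ih => simp only [cPass]; split <;> simp [ih]

-- A's outer loop recast as a pair-splitting loop using the carry sweep (proof-side helper only)
def cGo (seg : List Int) (r : Int) : Int :=
  match seg with
  | a :: b :: rest =>
    if PySem.Int.floordiv a 2 = PySem.Int.floordiv b 2 then cGo rest r
    else
      let p := cPass (PySem.Int.floordiv a 2) b rest
      cGo p.1 (r + p.2.2)
  | _ => r
termination_by seg.length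
decreasing_by all_goals simp [cPass_len]

theorem pvGi_getD (row : List Int) (k : Nat) : pvGi row k = row.getD k 0 := by
  simp [pvGi, List.getD_eq_getElem?_getD]

theorem pvGi_append_self (P : List Int) (y : Int) (ys : List Int) :
    pvGi (P ++ y :: ys) P.length = y := by
  rw [pvGi_getD, List.getD_append_right _ _ _ _ le_rfl]
  simp

theorem set_append_len (P L : List Int) (k : Nat) (v : Int) :
    (P ++ L).set (P.length + k) v = P ++ L.set k v := by
  induction P with
  | nil => simp
  | cons p ps ih =>
    simp only [List.cons_append, List.length_cons]
    have e : ps.length + 1 + k = (ps.length + k) + 1 := by omega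
    rw [e]
    simp [List.set, ih]

theorem set_append_self (P : List Int) (y : Int) (ys : List Int) (v : Int) :
    (P ++ y :: ys).set P.length v = P ++ v :: ys := by
  have h := set_append_len P (y :: ys) 0 v
  simpa using h

-- A's inner loop, started past the guarded pair, performs exactly the carry sweep.
theorem inner_eq (a : Int) (P : List Int) (S : List Int) : ∀ (Y : List Int) (carry r : Int),
    aInner (P.length + 2 + Y.length + S.length) P.length (P.length + 2 + Y.length)
        (P ++ a :: carry :: (Y ++ S)) r
      = (P ++ a :: (cPass (PySem.Int.floordiv a 2) carry S).2.1 ::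
          (Y ++ (cPass (PySem.Int.floordiv a 2) carry S).1),
         r + (cPass (PySem.Int.floordiv a 2) carry S).2.2) := by
  induction S with
  | nil =>
    intro Y carry r
    rw [aInner.eq_def]
    simp [cPass]
  | cons x xs ih =>
    intro Y carry r
    have hrow1 : P ++ a :: carry :: (Y ++ x :: xs) = (P ++ [a]) ++ carry :: (Y ++ x :: xs) := by simp
    have hrow2 : P ++ a :: carry :: (Y ++ x :: xs) = (P ++ a :: carry :: Y) ++ x :: xs := by simp
    have hga : pvGi (P ++ a :: carry :: (Y ++ x :: xs)) P.length = a := pvGi_append_self P a _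
    have hgb : pvGi (P ++ a :: carry :: (Y ++ x :: xs)) (P.length + 1) = carry := by
      rw [hrow1]
      have h := pvGi_append_self (P ++ [a]) carry (Y ++ x :: xs)
      simpa using h
    have hgx : pvGi (P ++ a :: carry :: (Y ++ x :: xs)) (P.length + 2 + Y.length) = x := by
      rw [hrow2]
      have h := pvGi_append_self (P ++ a :: carry :: Y) x xs
      have e : (P ++ a :: carry :: Y).length = P.length + 2 + Y.length := by
        simp only [List.length_append, List.length_cons, List.length_nil]; omega
      rw [e] at h
      exact h
    rw [aInner.eq_def]
    rw [dif_pos (by simp only [List.length_cons]; omega)]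
    rw [hga, hgx, hgb]
    by_cases hc : PySem.Int.floordiv x 2 = PySem.Int.floordiv a 2
    · rw [if_pos hc.symm]
      have hset1 : (P ++ a :: carry :: (Y ++ x :: xs)).set (P.length + 1) x
          = P ++ a :: x :: (Y ++ x :: xs) := by
        rw [hrow1]
        have h := set_append_self (P ++ [a]) carry (Y ++ x :: xs) x
        simpa using h
      have hset2 : (P ++ a :: x :: (Y ++ x :: xs)).set (P.length + 2 + Y.length) carry
          = P ++ a :: x :: ((Y ++ [carry]) ++ xs) := by
        have h2 : P ++ a :: x :: (Y ++ x :: xs) = (P ++ a :: x :: Y) ++ x :: xs := by simp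
        rw [h2]
        have e : P.length + 2 + Y.length = (P ++ a :: x :: Y).length := by
          simp only [List.length_append, List.length_cons, List.length_nil]; omega
        rw [e, set_append_self]
        simp
      rw [hset1, hset2]
      have e1 : P.length + 2 + Y.length + (x :: xs).length
          = P.length + 2 + (Y ++ [carry]).length + xs.length := by
        simp only [List.length_cons, List.length_append, List.length_nil]; omega
      have e2 : P.length + 2 + Y.length + 1 = P.length + 2 + (Y ++ [carry]).length := by
        simp only [List.length_append, List.length_cons, List.length_nil]; omega
      rw [e1, e2, ih (Y ++ [carry]) x (r + 1)]
      simp only [cPass]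
      rw [if_pos hc]
      simp [List.append_assoc]
      omega
    · rw [if_neg (fun h => hc h.symm)]
      have e1 : P.length + 2 + Y.length + (x :: xs).length
          = P.length + 2 + (Y ++ [x]).length + xs.length := by
        simp only [List.length_cons, List.length_append, List.length_nil]; omega
      have e2 : P.length + 2 + Y.length + 1 = P.length + 2 + (Y ++ [x]).length := by
        simp only [List.length_append, List.length_cons, List.length_nil]; omega
      have e3 : P ++ a :: carry :: (Y ++ x :: xs) = P ++ a :: carry :: ((Y ++ [x]) ++ xs) := by simp
      rw [e1, e2, e3, ih (Y ++ [x]) carry r]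
      simp only [cPass]
      rw [if_neg hc]
      simp [List.append_assoc]

-- A's outer loop from position |P| computes the carry-sweep loop on the suffix S.
theorem outer_eq : ∀ (m : Nat) (S P : List Int) (r : Int), S.length ≤ m → S.length % 2 = 0 →
    aOuter (P.length + S.length) P.length (P ++ S) r = cGo S r := by
  intro m
  induction m with
  | zero =>
    intro S P r hle hpar
    rcases S with _ | ⟨a, S'⟩
    · rw [aOuter.eq_def]; simp [cGo]
    · simp at hle
  | succ m ih =>
    intro S P r hle hpar
    rcases S with _ | ⟨a, S'⟩
    · rw [aOuter.eq_def]; simp [cGo]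
    rcases S' with _ | ⟨b, rest⟩
    · simp at hpar
    have hga : pvGi (P ++ a :: b :: rest) P.length = a := pvGi_append_self P a _
    have hgb : pvGi (P ++ a :: b :: rest) (P.length + 1) = b := by
      have h := pvGi_append_self (P ++ [a]) b rest
      simpa using h
    rw [aOuter.eq_def]
    rw [dif_pos (by simp only [List.length_cons]; omega)]
    rw [hga, hgb]
    have hL : rest.length + 2 ≤ m + 1 := by simp only [List.length_cons] at hle; omega
    have hP2 : rest.length % 2 = 0 := by simp only [List.length_cons] at hpar; omega
    by_cases hc : PySem.Int.floordiv a 2 = PySem.Int.floordiv b 2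
    · rw [if_pos hc]
      have e1 : P ++ a :: b :: rest = (P ++ [a, b]) ++ rest := by simp
      have e2 : P.length + (a :: b :: rest).length = (P ++ [a, b]).length + rest.length := by
        simp only [List.length_append, List.length_cons, List.length_nil]; omega
      have e3 : P.length + 2 = (P ++ [a, b]).length := by simp
      rw [e2, e3, e1, ih rest (P ++ [a, b]) r (by omega : rest.length ≤ m) hP2]
      simp only [cGo]
      rw [if_pos hc]
    · rw [if_neg hc]
      rw [aInner.eq_def]
      rw [dif_pos (by simp only [List.length_cons]; omega)]
      rw [hga, hgb, if_neg hc]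
      have hin := inner_eq a P rest [] b r
      simp only [List.length_nil, Nat.add_zero, List.nil_append] at hin
      have eN : P.length + (a :: b :: rest).length = P.length + 2 + rest.length := by
        simp only [List.length_cons]; omega
      have e12 : P.length + 1 + 1 = P.length + 2 := by omega
      rw [eN, e12, hin]
      have hys := cPass_len (PySem.Int.floordiv a 2) b rest
      generalize hq : cPass (PySem.Int.floordiv a 2) b rest = q at *
      obtain ⟨ys, c, k⟩ := q
      simp only at hys ⊢
      have happ : P ++ a :: c :: ys = (P ++ [a, c]) ++ ys := by simp
      have e4 : P.length + 2 + rest.length = (P ++ [a, c]).length + ys.length := by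
        simp only [List.length_append, List.length_cons, List.length_nil]; omega
      have e5 : P.length + 2 = (P ++ [a, c]).length := by simp
      have hfin := ih ys (P ++ [a, c]) (r + k) (by omega : ys.length ≤ m) (by omega : ys.length % 2 = 0)
      have hrhs : cGo (a :: b :: rest) r = cGo ys (r + k) := by
        simp only [cGo]
        rw [if_neg hc, hq]
      rw [e4, e5, happ, hrhs]
      exact hfin

-- ===== the carry sweep equals B's first-match sweep when the group occurs at most once =====

def grpCount (g : Int) (s : List Int) : Nat := s.countP (fun y => PySem.Int.floordiv y 2 = g)

theorem grpCount_nil (g : Int) : grpCount g [] = 0 := rfl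

theorem grpCount_cons (g x : Int) (xs : List Int) :
    grpCount g (x :: xs)
      = (if PySem.Int.floordiv x 2 = g then 1 else 0) + grpCount g xs := by
  simp only [grpCount, List.countP_cons, decide_eq_true_eq]
  split_ifs <;> omega

-- with no member of group g in the tail, the carry sweep is the identity
theorem cPass_none (g carry : Int) (s : List Int) (h : grpCount g s = 0) :
    cPass g carry s = (s, carry, 0) := by
  induction s generalizing carry with
  | nil => rfl
  | cons x xs ih =>
    rw [grpCount_cons] at h
    have hx : ¬ PySem.Int.floordiv x 2 = g := by
      intro hc; rw [if_pos hc] at h; omega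
    have hxs : grpCount g xs = 0 := by
      rw [if_neg hx] at h; omega
    simp only [cPass, if_neg hx, ih carry hxs]

-- with at most one member of group g in the tail, carry sweep = first-match sweep
theorem cPass_eq_bFix (g b : Int) (s : List Int) (h : grpCount g s ≤ 1) :
    (cPass g b s).1 = (bFix g b s).1 ∧ (cPass g b s).2.2 = (bFix g b s).2 := by
  induction s generalizing b with
  | nil => exact ⟨rfl, rfl⟩
  | cons x xs ih =>
    rw [grpCount_cons] at h
    by_cases hx : PySem.Int.floordiv x 2 = g
    · have hxs : grpCount g xs = 0 := by rw [if_pos hx] at h; omega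
      simp only [cPass, bFix, if_pos hx, cPass_none g x xs hxs]
      simp
    · have hxs : grpCount g xs ≤ 1 := by rw [if_neg hx] at h; omega
      have := ih b hxs
      simp only [cPass, bFix, if_neg hx]
      exact ⟨by rw [this.1], this.2⟩

-- structure of B's sweep result: membership and counts only shrink (up to the inserted b)
theorem bFix_mem (g b : Int) (s : List Int) (x : Int) (hx : x ∈ (bFix g b s).1) :
    x = b ∨ x ∈ s := by
  induction s with
  | nil => simp [bFix] at hx
  | cons y ys ih =>
    simp only [bFix] at hx
    split at hx
    · rcases List.mem_cons.mp hx with h | h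
      · exact Or.inl h
      · exact Or.inr (List.mem_cons_of_mem _ h)
    · rcases List.mem_cons.mp hx with h | h
      · exact Or.inr (h ▸ List.mem_cons_self ..)
      · rcases ih h with h' | h'
        · exact Or.inl h'
        · exact Or.inr (List.mem_cons_of_mem _ h')

theorem bFix_grpCount (g b : Int) (s : List Int) (g' : Int) :
    grpCount g' (bFix g b s).1 ≤ grpCount g' (b :: s) := by
  induction s with
  | nil =>
    simp only [bFix, grpCount_cons, grpCount_nil]
    split_ifs <;> omega
  | cons y ys ih =>
    simp only [bFix]
    split
    · rw [grpCount_cons (x := b), grpCount_cons (x := b), grpCount_cons (x := y)]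
      split_ifs <;> omega
    · rw [grpCount_cons (x := y)]
      have hb : grpCount g' (b :: ys) = (if PySem.Int.floordiv b 2 = g' then 1 else 0) + grpCount g' ys := grpCount_cons ..
      have hbs : grpCount g' (b :: y :: ys)
          = (if PySem.Int.floordiv b 2 = g' then 1 else 0)
            + ((if PySem.Int.floordiv y 2 = g' then 1 else 0) + grpCount g' ys) := by
        rw [grpCount_cons, grpCount_cons]
      have := ih
      rw [hb] at this
      rw [hbs]
      split_ifs at * <;> omega

-- the invariant: every group occurs at most twice in the remaining segment
def SegInv (s : List Int) : Prop := ∀ x ∈ s, grpCount (PySem.Int.floordiv x 2) s ≤ 2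

theorem grpCount_tail (g y : Int) (ys : List Int) : grpCount g ys ≤ grpCount g (y :: ys) := by
  rw [grpCount_cons]; split_ifs <;> omega

theorem SegInv_tail (y : Int) (ys : List Int) (h : SegInv (y :: ys)) : SegInv ys := by
  intro x hx
  exact le_trans (grpCount_tail _ _ _) (h x (List.mem_cons_of_mem _ hx))

-- the main bridge: carry-sweep loop = B's loop on segments satisfying the invariant
theorem cGo_eq_bLoop : ∀ (m : Nat) (seg : List Int) (r : Int), seg.length ≤ m → SegInv seg →
    cGo seg r = bLoop seg r := by
  intro m
  induction m with
  | zero =>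
    intro seg r hle _
    rcases seg with _ | ⟨a, seg'⟩
    · simp [cGo, bLoop]
    · simp at hle
  | succ m ih =>
    intro seg r hle hinv
    rcases seg with _ | ⟨a, seg'⟩
    · simp [cGo, bLoop]
    rcases seg' with _ | ⟨b, rest⟩
    · simp [cGo, bLoop]
    by_cases hc : PySem.Int.floordiv a 2 = PySem.Int.floordiv b 2
    · simp only [cGo, bLoop, if_pos hc, if_neg (not_not_intro hc)]
      exact ih rest r (by simp only [List.length_cons] at hle; omega)
        (SegInv_tail _ _ (SegInv_tail _ _ hinv))
    · -- group of a occurs at most once in rest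
      have ha2 : grpCount (PySem.Int.floordiv a 2) (a :: b :: rest) ≤ 2 :=
        hinv a (List.mem_cons_self ..)
      have hrest1 : grpCount (PySem.Int.floordiv a 2) rest ≤ 1 := by
        rw [grpCount_cons, grpCount_cons] at ha2
        rw [if_pos rfl, if_neg (fun h => hc h.symm)] at ha2
        omega
      have hpq := cPass_eq_bFix (PySem.Int.floordiv a 2) b rest hrest1
      simp only [cGo, bLoop, if_neg hc, if_pos hc]
      rw [hpq.1, hpq.2]
      apply ih _ _ ?_ ?_
      · have := bFix_len (PySem.Int.floordiv a 2) b rest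
        simp only [List.length_cons] at hle
        omega
      · -- the new segment still satisfies the invariant
        intro x hx
        have hx' := bFix_mem _ _ _ _ hx
        have hcnt := bFix_grpCount (PySem.Int.floordiv a 2) b rest (PySem.Int.floordiv x 2)
        have hsrc : grpCount (PySem.Int.floordiv x 2) (b :: rest)
            ≤ grpCount (PySem.Int.floordiv x 2) (a :: b :: rest) := grpCount_tail _ _ _
        have hx2 : grpCount (PySem.Int.floordiv x 2) (a :: b :: rest) ≤ 2 := by
          rcases hx' with h | h
          · exact h ▸ hinv b (List.mem_cons_of_mem _ (List.mem_cons_self ..))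
          · exact hinv x (List.mem_cons_of_mem _ (List.mem_cons_of_mem _ h))
        omega

-- ===== VERDICT (by name: the statement is the Claim_ definition above) =====
theorem minSwapsCouples2_spec : Claim_equal_minSwapsCouples2 := by
  intro row _ hpre
  obtain ⟨heven, hcnt⟩ := hpre
  unfold Spec_minSwapsCouples2 minSwapsCouples2 minSwapsCouples2_alt
  have h1 := outer_eq row.length row [] 0 le_rfl heven
  simp only [List.length_nil, Nat.zero_add, List.nil_append] at h1
  rw [h1]
  exact cGo_eq_bLoop row.length row 0 le_rfl (fun x hx => hcnt x hx)
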